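-- pv_equiv track=rewrite | github.com/caishamble/aethra | cse_course_file/CSE231/week9/exam2/question1.py | max_occurences
-- ===== SOURCE A (Python) =====
-- def max_occurences(lst):
--     cnt_list = []
--     sample_list = []
--     max_mark = -1
--     for element in lst:
--         if element not in sample_list:
--             sample_list.append(element)
--             cnt_list.append(int(1))
--         elif element in sample_list:
--             index = sample_list.index(element)
--             cnt_list[index] += 1
--     for count in cnt_list:
--         if count > max_mark:
--             max_mark = count
--     my_dict = dict(zip(sample_list,cnt_list))
--     new_list = []
--     for key,value in my_dict.items():
--         if value == max_mark:
--             new_list.append(key)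
--     sorted_new_list = sorted(new_list)
--     return sorted_new_list[0]
-- ===== SOURCE B (Python) =====
-- def max_occurences(lst):
--     s = sorted(lst)
--     best_elem = s[0]
--     best_cnt = 0
--     cur_cnt = 0
--     prev = None
--     for x in s:
--         if x == prev:
--             cur_cnt += 1
--         else:
--             cur_cnt = 1
--             prev = x
--         if cur_cnt > best_cnt:
--             best_cnt = cur_cnt
--             best_elem = x
--     return best_elem
-- ===== Notes on version B (the rewrite author's own statement) =====
-- stated objective: alternative
-- what changed: Replaces A's membership/index scans over parallel sample/count lists plus a dict and a final sort of the winners by one sort of the input followed by a single run-length pass that tracks the current run and the best (count, smallest element) so far.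
import Mathlib
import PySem

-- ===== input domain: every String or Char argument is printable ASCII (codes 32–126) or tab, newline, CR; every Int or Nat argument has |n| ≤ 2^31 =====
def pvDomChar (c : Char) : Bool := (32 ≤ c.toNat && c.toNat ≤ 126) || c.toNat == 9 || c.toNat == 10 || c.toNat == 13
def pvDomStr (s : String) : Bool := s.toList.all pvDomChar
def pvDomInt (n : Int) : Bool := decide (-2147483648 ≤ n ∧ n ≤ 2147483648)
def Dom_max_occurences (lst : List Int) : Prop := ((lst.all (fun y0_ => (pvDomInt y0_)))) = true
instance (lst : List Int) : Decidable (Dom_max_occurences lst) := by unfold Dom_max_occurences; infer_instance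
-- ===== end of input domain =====

-- B sorts the input once and makes a single run-length pass tracking the best (count, element);
-- A counts with list scans, a dict and a final sort of the winners. Proved equal on every nonempty list.

-- ===== PORT A =====
def pvAStep (st : List Int × List Int) (element : Int) : List Int × List Int :=
  if element ∉ st.2 then (st.1 ++ [(1 : Int)], st.2 ++ [element])
  else
    match PySem.List.index? st.2 element with
    | some index => (st.1.set index (st.1.getD index 0 + 1), st.2)
    | none => st

def pvMaxMark (cnt_list : List Int) : Int :=
  cnt_list.foldl (fun max_mark count => if count > max_mark then count else max_mark) (-1)

def pvDictOf (pairs : List (Int × Int)) : PySem.Dict Int Int :=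
  pairs.foldl (fun d p => d.insert p.1 p.2) PySem.Dict.empty

def pvNewList (items : List (Int × Int)) (max_mark : Int) : List Int :=
  items.foldl (fun acc kv => if kv.2 = max_mark then acc ++ [kv.1] else acc) []

def max_occurences (lst : List Int) : Int :=
  let st := lst.foldl pvAStep ([], [])
  let max_mark := pvMaxMark st.1
  let my_dict := pvDictOf (st.2.zip st.1)
  let new_list := pvNewList my_dict.items max_mark
  let sorted_new_list := PySem.List.sorted new_list (fun x => x) false
  (PySem.List.pyGet? sorted_new_list 0).getD 0

-- ===== PORT B =====
def pvBStep (st : Int × Int × Int × Option Int) (x : Int) : Int × Int × Int × Option Int :=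
  let cc : Int := if some x = st.2.2.2 then st.2.2.1 + 1 else 1
  let prev : Option Int := if some x = st.2.2.2 then st.2.2.2 else some x
  if cc > st.2.1 then (x, cc, cc, prev) else (st.1, st.2.1, cc, prev)

def max_occurences_alt (lst : List Int) : Int :=
  let s := PySem.List.sorted lst (fun x => x) false
  let best_elem := (PySem.List.pyGet? s 0).getD 0
  (s.foldl pvBStep (best_elem, 0, 0, none)).1

-- ===== PRECONDITION & SPEC =====
-- Pre_ excludes exactly the empty list, on which both A and B raise IndexError (indexing [0] into an empty list).
def Pre_max_occurences (lst : List Int) : Prop := lst ≠ []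
instance (lst : List Int) : Decidable (Pre_max_occurences lst) := by unfold Pre_max_occurences; infer_instance
def pvWitness_max_occurences : List Int := [3, 1, 2, 1]

def Spec_max_occurences (lst : List Int) (out : Int) : Prop := out = max_occurences_alt lst
instance (lst : List Int) (out : Int) : Decidable (Spec_max_occurences lst out) := by unfold Spec_max_occurences; infer_instance

-- ===== CLAIM (what is proved, stated in full; the proofs are below) =====
def Claim_equal_max_occurences : Prop := ∀ (lst : List Int), Dom_max_occurences lst → Pre_max_occurences lst → Spec_max_occurences lst (max_occurences lst)

-- ===== LEMMAS AND PROOFS =====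

-- "r is the smallest element of lst with maximal occurrence count"; both ports satisfy it, and it is unique
def pvIsAns (lst : List Int) (r : Int) : Prop :=
  r ∈ lst ∧ (∀ y ∈ lst, lst.count y ≤ lst.count r) ∧ (∀ y ∈ lst, lst.count y = lst.count r → r ≤ y)

theorem pvIsAns_unique {lst : List Int} {r r' : Int} (h : pvIsAns lst r) (h' : pvIsAns lst r') : r = r' := by
  obtain ⟨hm, hmax, hmin⟩ := h
  obtain ⟨hm', hmax', hmin'⟩ := h'
  have h1 : lst.count r = lst.count r' := le_antisymm (hmax' r hm) (hmax r' hm')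
  exact le_antisymm (hmin r' hm' h1.symm) (hmin' r hm h1)

-- ---- A-side: the counting loop builds (counts, first-occurrence dedup) ----
def pvCnts (p : List Int) : List Int := (PySem.Set.ofList p).map (fun e => (p.count e : Int))

theorem pvOfList_append_mem (p : List Int) (x : Int) (hx : x ∈ p) :
    PySem.Set.ofList (p ++ [x]) = PySem.Set.ofList p := by
  rw [PySem.Set.ofList_eq_foldl, List.foldl_append, ← PySem.Set.ofList_eq_foldl]
  simp only [List.foldl_cons, List.foldl_nil]
  exact PySem.Set.add_of_mem (by simpa [PySem.Set.mem_ofList] using hx)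

theorem pvOfList_append_not_mem (p : List Int) (x : Int) (hx : x ∉ p) :
    PySem.Set.ofList (p ++ [x]) = PySem.Set.ofList p ++ [x] := by
  rw [PySem.Set.ofList_eq_foldl, List.foldl_append, ← PySem.Set.ofList_eq_foldl]
  simp only [List.foldl_cons, List.foldl_nil]
  exact PySem.Set.add_of_not_mem (by simpa [PySem.Set.mem_ofList] using hx)

theorem pvAStep_eq (p : List Int) (x : Int) :
    pvAStep (pvCnts p, PySem.Set.ofList p) x = (pvCnts (p ++ [x]), PySem.Set.ofList (p ++ [x])) := by
  by_cases hx : x ∈ p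
  · have hxd : x ∈ PySem.Set.ofList p := by simpa [PySem.Set.mem_ofList] using hx
    have hsome : PySem.List.index? (PySem.Set.ofList p) x ≠ none := by
      rw [Ne, PySem.List.index?_eq_none_iff]; exact fun h => h hxd
    obtain ⟨i, hi⟩ := Option.ne_none_iff_exists'.mp hsome
    obtain ⟨hilt, hgeti, _⟩ := PySem.List.getElem_of_index?_eq_some hi
    have hnd : (PySem.Set.ofList p).Nodup := PySem.Set.nodup_ofList p
    have hlen : (pvCnts p).length = (PySem.Set.ofList p).length := by simp [pvCnts]
    unfold pvAStep
    rw [if_neg (by exact fun h => h hxd), pvOfList_append_mem p x hx]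
    simp only [hi]
    refine Prod.ext ?_ rfl
    have hgd : (pvCnts p).getD i 0 = (p.count x : Int) := by
      rw [List.getD_eq_getElem _ _ (by omega)]
      simp [pvCnts, hgeti]
    simp only [hgd]
    apply List.ext_getElem
    · simp [pvCnts, pvOfList_append_mem p x hx]
    · intro j h1 h2
      have hjlt : j < (PySem.Set.ofList p).length := by
        simpa [pvCnts, pvOfList_append_mem p x hx] using h2
      rw [List.getElem_set]
      by_cases hji : j = i
      · subst hji
        simp [pvCnts, pvOfList_append_mem p x hx, hgeti, List.count_append]
      · have hne : (PySem.Set.ofList p)[j] ≠ x := by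
          intro hEq
          exact hji (hnd.getElem_inj_iff.mp (hEq.trans hgeti.symm))
        rw [if_neg (fun h => hji h.symm)]
        simp [pvCnts, pvOfList_append_mem p x hx, List.count_append, List.count_singleton', Ne.symm hne]
  · have hxd : x ∉ PySem.Set.ofList p := by simpa [PySem.Set.mem_ofList] using hx
    unfold pvAStep
    rw [if_pos (by exact hxd), pvOfList_append_not_mem p x hx]
    refine Prod.ext ?_ rfl
    simp only [pvCnts, pvOfList_append_not_mem p x hx, List.map_append]
    congr 1
    · apply List.map_congr_left
      intro e he
      have hne : e ≠ x := fun h => hx (h ▸ (by simpa [PySem.Set.mem_ofList] using he))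
      simp [List.count_append, Ne.symm hne]
    · simp [List.count_append, List.count_eq_zero_of_not_mem hx]

theorem pvFoldA (l : List Int) : ∀ (p : List Int),
    l.foldl pvAStep (pvCnts p, PySem.Set.ofList p) = (pvCnts (p ++ l), PySem.Set.ofList (p ++ l)) := by
  induction l with
  | nil => intro p; simp
  | cons x l ih =>
    intro p
    rw [List.foldl_cons, pvAStep_eq p x, ih (p ++ [x])]
    simp

theorem pvMaxMark_eq (l : List Int) : pvMaxMark l = l.foldl max (-1) := by
  unfold pvMaxMark
  rw [show (fun (m c : Int) => if c > m then c else m) = (max : Int → Int → Int) from by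
    funext m c
    by_cases hc : c > m
    · simp [hc, max_eq_right (le_of_lt hc)]
    · simp [hc, max_eq_left (le_of_not_gt hc)]]

theorem pvNewList_eq (items : List (Int × Int)) (M : Int) :
    pvNewList items M = (items.filter (fun kv => decide (kv.2 = M))).map Prod.fst := by
  have := PySem.List.foldl_append_ite (fun kv : Int × Int => kv.2 = M) Prod.fst items []
  simpa [pvNewList] using this

theorem pvA_isAns (lst : List Int) (h : lst ≠ []) : pvIsAns lst (max_occurences lst) := by
  have hddne : PySem.Set.ofList lst ≠ [] := by
    cases lst with
    | nil => exact absurd rfl h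
    | cons a l =>
      intro hd
      have : a ∈ PySem.Set.ofList (a :: l) := by simp [PySem.Set.mem_ofList]
      simp [hd] at this
  have hcnts_mem : ∀ c ∈ pvCnts lst, ∃ e ∈ PySem.Set.ofList lst, c = (lst.count e : Int) := by
    intro c hc
    simp only [pvCnts, List.mem_map] at hc
    obtain ⟨e, he, hce⟩ := hc
    exact ⟨e, he, hce.symm⟩
  have hcnts_pos : ∀ c ∈ pvCnts lst, 1 ≤ c := by
    intro c hc
    obtain ⟨e, he, rfl⟩ := hcnts_mem c hc
    have he' : e ∈ lst := by simpa [PySem.Set.mem_ofList] using he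
    have := List.count_pos_iff.mpr he'
    omega
  have hmax_ge := PySem.List.le_foldl_max (pvCnts lst) (-1)
  have hmax_mem := PySem.List.foldl_max_mem (pvCnts lst) (-1)
  have hMmem : ∃ e ∈ PySem.Set.ofList lst,
      List.foldl max (-1) (pvCnts lst) = (lst.count e : Int) := by
    rcases hmax_mem with hneg | hmem
    · exfalso
      have hcne : pvCnts lst ≠ [] := by
        simp only [pvCnts, Ne, List.map_eq_nil_iff]
        exact hddne
      obtain ⟨c, hc⟩ := List.exists_mem_of_ne_nil (pvCnts lst) hcne
      have h1 := hmax_ge.2 c hc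
      have h2 := hcnts_pos c hc
      omega
    · exact hcnts_mem _ hmem
  have hMge : ∀ e ∈ PySem.Set.ofList lst, (lst.count e : Int) ≤ List.foldl max (-1) (pvCnts lst) := by
    intro e he
    exact hmax_ge.2 _ (by simp only [pvCnts, List.mem_map]; exact ⟨e, he, rfl⟩)
  have hlen : (pvCnts lst).length = (PySem.Set.ofList lst).length := by simp [pvCnts]
  -- reduce the port to an explicit term
  unfold max_occurences
  rw [show (([] : List Int), ([] : List Int)) = (pvCnts [], PySem.Set.ofList []) from rfl,
    pvFoldA lst []]
  dsimp only
  simp only [List.nil_append]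
  rw [pvMaxMark_eq]
  -- the dict items are the (element, count) pairs
  have hzip : (PySem.Set.ofList lst).zip (pvCnts lst)
      = (PySem.Set.ofList lst).map (fun e => (e, (lst.count e : Int))) := by
    conv_lhs => rw [← List.map_id (PySem.Set.ofList lst)]
    rw [pvCnts, List.zip_map']
    simp
  have hitems : (pvDictOf ((PySem.Set.ofList lst).zip (pvCnts lst))).items
      = (PySem.Set.ofList lst).map (fun e => (e, (lst.count e : Int))) := by
    unfold pvDictOf
    have hfresh := PySem.Dict.items_foldl_insert_fresh
      (l := (PySem.Set.ofList lst).zip (pvCnts lst)) (d := PySem.Dict.empty)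
      (k := Prod.fst) (v := Prod.snd)
      (by intro a _; exact PySem.Dict.contains_empty _)
      (by rw [List.map_fst_zip (show (PySem.Set.ofList lst).length ≤ (pvCnts lst).length by omega)]
          exact PySem.Set.nodup_ofList lst)
    rw [hfresh]
    simp [hzip, PySem.Dict.empty]
  rw [hitems, pvNewList_eq, List.filter_map, List.map_map]
  simp only [Function.comp_def]
  have hfilt : ((PySem.Set.ofList lst).filter
        (fun e => decide ((lst.count e : Int) = List.foldl max (-1) (pvCnts lst)))).map
      (fun e => (e, (lst.count e : Int)).1)
      = (PySem.Set.ofList lst).filter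
        (fun e => decide ((lst.count e : Int) = List.foldl max (-1) (pvCnts lst))) := by
    simp
  rw [hfilt]
  -- head of the sorted winners
  have hnlne : (PySem.Set.ofList lst).filter
      (fun e => decide ((lst.count e : Int) = List.foldl max (-1) (pvCnts lst))) ≠ [] := by
    obtain ⟨e, he, hEq⟩ := hMmem
    intro hn
    have : e ∈ (PySem.Set.ofList lst).filter
        (fun e => decide ((lst.count e : Int) = List.foldl max (-1) (pvCnts lst))) := by
      rw [List.mem_filter]
      exact ⟨he, by simp [hEq]⟩
    simp [hn] at this
  have hsne : PySem.List.sorted ((PySem.Set.ofList lst).filter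
      (fun e => decide ((lst.count e : Int) = List.foldl max (-1) (pvCnts lst)))) (fun x => x) false ≠ [] := by
    rw [Ne, PySem.List.sorted_eq_nil_iff]
    exact hnlne
  obtain ⟨m, t, hmt⟩ := List.exists_cons_of_ne_nil hsne
  rw [hmt]
  have hget : (PySem.List.pyGet? (m :: t) 0).getD 0 = m := by
    simp [PySem.List.pyGet?, PySem.List.pyIdx?]
  rw [hget]
  have hmmem : m ∈ (PySem.Set.ofList lst).filter
      (fun e => decide ((lst.count e : Int) = List.foldl max (-1) (pvCnts lst))) := by
    have : m ∈ PySem.List.sorted ((PySem.Set.ofList lst).filter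
        (fun e => decide ((lst.count e : Int) = List.foldl max (-1) (pvCnts lst)))) (fun x => x) false := by
      rw [hmt]; exact List.mem_cons_self
    rwa [PySem.List.mem_sorted] at this
  have hmle : ∀ y ∈ (PySem.Set.ofList lst).filter
      (fun e => decide ((lst.count e : Int) = List.foldl max (-1) (pvCnts lst))), m ≤ y := by
    have := PySem.List.key_head_sorted_le _ _ hmt
    simpa using this
  rw [List.mem_filter] at hmmem
  obtain ⟨hmdd, hmcnt⟩ := hmmem
  have hmcnt' : (lst.count m : Int) = List.foldl max (-1) (pvCnts lst) := by simpa using hmcnt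
  refine ⟨by simpa [PySem.Set.mem_ofList] using hmdd, ?_, ?_⟩
  · intro y hy
    have h1 : (lst.count y : Int) ≤ List.foldl max (-1) (pvCnts lst) :=
      hMge y (by simpa [PySem.Set.mem_ofList] using hy)
    omega
  · intro y hy hcy
    apply hmle
    rw [List.mem_filter]
    refine ⟨by simpa [PySem.Set.mem_ofList] using hy, by simp [hcy, hmcnt']⟩

-- ---- B-side: loop invariant over the sorted list ----
def pvInv (p : List Int) (st : Int × Int × Int × Option Int) : Prop :=
  st.2.2.2 = p.getLast? ∧
  (∀ z : Int, p.getLast? = some z → st.2.2.1 = (p.count z : Int)) ∧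
  st.1 ∈ p ∧ (p.count st.1 : Int) = st.2.1 ∧
  (∀ y ∈ p, (p.count y : Int) ≤ st.2.1) ∧
  (∀ y ∈ p, (p.count y : Int) = st.2.1 → st.1 ≤ y)

theorem pvLe_getLast (p : List Int) (hp : p ≠ []) (hpair : p.Pairwise (· ≤ ·)) :
    ∀ y ∈ p, y ≤ p.getLast hp := by
  induction p with
  | nil => simp at hp
  | cons a q ih =>
    intro y hy
    cases q with
    | nil =>
      simp at hy
      simp [hy, List.getLast]
    | cons b r =>
      rw [List.getLast_cons (by simp : (b :: r) ≠ [])]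
      rcases List.mem_cons.mp hy with rfl | hyq
      · exact (List.pairwise_cons.mp hpair).1 _ (List.getLast_mem _)
      · exact ih (by simp) (List.pairwise_cons.mp hpair).2 y hyq

theorem pvBStep_inv (p : List Int) (x : Int) (st : Int × Int × Int × Option Int) (hp : p ≠ [])
    (hpair : p.Pairwise (· ≤ ·)) (hle : ∀ e ∈ p, e ≤ x) (hI : pvInv p st) :
    pvInv (p ++ [x]) (pvBStep st x) := by
  obtain ⟨be, bc, cc, prev⟩ := st
  obtain ⟨hprev, hcc, hbe_mem, hbe_cnt, hmax, hmin⟩ := hI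
  simp only at hprev hcc hbe_mem hbe_cnt hmax hmin
  obtain ⟨z, hz⟩ : ∃ z, p.getLast? = some z := ⟨_, List.getLast?_eq_some_getLast hp⟩
  rw [hz] at hprev
  subst hprev
  have hccz : cc = (p.count z : Int) := hcc z hz
  have hz_mem : z ∈ p := by
    have := List.getLast?_eq_some_getLast hp
    rw [hz] at this
    injection this with hthis
    rw [hthis]
    exact List.getLast_mem hp
  have hcount_app : ∀ y : Int, (p ++ [x]).count y = p.count y + if y = x then 1 else 0 := by
    intro y
    rw [List.count_append]
    by_cases hyx : y = x
    · simp [hyx]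
    · have hxy : x ≠ y := fun hEq => hyx hEq.symm
      simp [hxy, hyx]
  have hmem_app : ∀ y : Int, y ∈ p ++ [x] → y ≠ x → y ∈ p := by
    intro y hy hyx
    rcases List.mem_append.mp hy with h1 | h1
    · exact h1
    · simp at h1; exact absurd h1 hyx
  have hbc_pos : 1 ≤ bc := by
    have := List.count_pos_iff.mpr hbe_mem
    omega
  have hlast_app : (p ++ [x]).getLast? = some x := by simp
  dsimp only [pvBStep]
  split_ifs with hs hgt hgt
  -- case 1: x continues the run (x = z) and the new run count beats bc
  · injection hs with hs
    subst hs
    refine ⟨by simp, ?_, ?_, ?_, ?_, ?_⟩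
    · intro w hw
      rw [hlast_app] at hw
      injection hw with hw
      subst hw
      rw [hcount_app x]
      push_cast
      omega
    · simp
    · simp only
      rw [hcount_app x]
      push_cast
      omega
    · intro y hy
      simp only
      rw [hcount_app y]
      by_cases hyx : y = x
      · subst hyx
        push_cast
        omega
      · have := hmax y (hmem_app y hy hyx)
        simp only [if_neg hyx]
        push_cast
        omega
    · intro y hy hcy
      simp only at hcy ⊢
      by_cases hyx : y = x
      · simp [hyx]
      · exfalso
        rw [hcount_app y] at hcy
        have := hmax y (hmem_app y hy hyx)
        simp only [if_neg hyx] at hcy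
        push_cast at hcy
        omega
  -- case 2: x continues the run but the best stays
  · injection hs with hs
    subst hs
    have hbex : be ≠ x := by
      intro hEq
      rw [hEq] at hbe_cnt
      omega
    refine ⟨by simp, ?_, List.mem_append.mpr (Or.inl hbe_mem), ?_, ?_, ?_⟩
    · intro w hw
      rw [hlast_app] at hw
      injection hw with hw
      subst hw
      rw [hcount_app x]
      push_cast
      omega
    · simp only
      rw [hcount_app be]
      simp [hbex, hbe_cnt]
    · intro y hy
      simp only
      rw [hcount_app y]
      by_cases hyx : y = x
      · subst hyx
        push_cast
        omega
      · have := hmax y (hmem_app y hy hyx)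
        simp only [if_neg hyx]
        push_cast
        omega
    · intro y hy hcy
      simp only at hcy ⊢
      rw [hcount_app y] at hcy
      by_cases hyx : y = x
      · exact hyx ▸ hle be hbe_mem
      · simp only [if_neg hyx] at hcy
        push_cast at hcy
        exact hmin y (hmem_app y hy hyx) (by omega)
  -- case 3: a new run starts and "1 > bc": impossible since bc ≥ 1
  · omega
  -- case 4: a new run starts, the best stays
  · have hxz : x ≠ z := by
      intro hEq
      exact hs (by rw [hEq])
    have hxnp : x ∉ p := by
      intro hxp
      have h1 := pvLe_getLast p hp hpair x hxp
      have h2 := hle (p.getLast hp) (List.getLast_mem hp)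
      have hzz : p.getLast hp = z := by
        have := List.getLast?_eq_some_getLast hp
        rw [hz] at this
        injection this with hv
        exact hv.symm
      rw [hzz] at h1 h2
      exact hxz (le_antisymm h1 h2)
    have hbex : be ≠ x := fun hEq => hxnp (hEq ▸ hbe_mem)
    refine ⟨by simp, ?_, List.mem_append.mpr (Or.inl hbe_mem), ?_, ?_, ?_⟩
    · intro w hw
      rw [hlast_app] at hw
      injection hw with hw
      subst hw
      rw [hcount_app x]
      simp [List.count_eq_zero_of_not_mem hxnp]
    · simp only
      rw [hcount_app be]
      simp [hbex, hbe_cnt]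
    · intro y hy
      simp only
      rw [hcount_app y]
      by_cases hyx : y = x
      · subst hyx
        rw [List.count_eq_zero_of_not_mem hxnp]
        push_cast
        omega
      · have := hmax y (hmem_app y hy hyx)
        simp only [if_neg hyx]
        push_cast
        omega
    · intro y hy hcy
      simp only at hcy ⊢
      rw [hcount_app y] at hcy
      by_cases hyx : y = x
      · subst hyx
        exact hle be hbe_mem
      · simp only [if_neg hyx] at hcy
        push_cast at hcy
        exact hmin y (hmem_app y hy hyx) (by omega)

theorem pvFoldB (l : List Int) : ∀ (p : List Int) (st : Int × Int × Int × Option Int),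
    (p ++ l).Pairwise (· ≤ ·) → p ≠ [] → pvInv p st → pvInv (p ++ l) (l.foldl pvBStep st) := by
  induction l with
  | nil =>
    intro p st _ _ hI
    simpa using hI
  | cons x l ih =>
    intro p st hpair hp hI
    have hsplit := List.pairwise_append.mp hpair
    have hle : ∀ e ∈ p, e ≤ x := fun e he => hsplit.2.2 e he x List.mem_cons_self
    have hppair : p.Pairwise (· ≤ ·) := hsplit.1
    have hstep := pvBStep_inv p x st hp hppair hle hI
    have h1 : ((p ++ [x]) ++ l).Pairwise (· ≤ ·) := by simpa [List.append_assoc] using hpair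
    have := ih (p ++ [x]) (pvBStep st x) h1 (by simp) hstep
    simpa [List.append_assoc] using this

theorem pvB_isAns (lst : List Int) (h : lst ≠ []) : pvIsAns lst (max_occurences_alt lst) := by
  have hsne : PySem.List.sorted lst (fun x => x) false ≠ [] := by
    rw [Ne, PySem.List.sorted_eq_nil_iff]
    exact h
  obtain ⟨hd, tl, hs⟩ := List.exists_cons_of_ne_nil hsne
  have hpw : (hd :: tl).Pairwise (· ≤ ·) := by
    have := PySem.List.sorted_pairwise lst (fun x => x)
    rw [hs] at this
    simpa using this
  have hperm : (hd :: tl).Perm lst := by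
    have := PySem.List.sorted_perm lst (fun x => x) false
    rwa [hs] at this
  unfold max_occurences_alt
  rw [hs]
  dsimp only
  have hbe : (PySem.List.pyGet? (hd :: tl) 0).getD 0 = hd := by
    simp [PySem.List.pyGet?, PySem.List.pyIdx?]
  rw [hbe, List.foldl_cons]
  have hstep1 : pvBStep (hd, 0, 0, none) hd = (hd, 1, 1, some hd) := by
    simp [pvBStep]
  rw [hstep1]
  have hI1 : pvInv [hd] (hd, 1, 1, some hd) := by
    refine ⟨by simp, ?_, by simp, by simp, ?_, ?_⟩
    · intro z hz
      simp at hz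
      simp [hz]
    · intro y hy
      simp at hy
      simp [hy]
    · intro y hy _
      simp at hy
      simp [hy]
  have hinv := pvFoldB tl [hd] (hd, 1, 1, some hd) (by simpa using hpw) (by simp) hI1
  simp only [List.cons_append, List.nil_append] at hinv
  obtain ⟨_, _, hmem, hcnt, hmax, hmin⟩ := hinv
  have hcount : ∀ y : Int, (hd :: tl).count y = lst.count y := fun y => hperm.count_eq y
  refine ⟨?_, ?_, ?_⟩
  · exact hperm.mem_iff.mp hmem
  · intro y hy
    have h1 := hmax y (hperm.mem_iff.mpr hy)
    rw [← hcnt, hcount y, hcount _] at h1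
    exact_mod_cast h1
  · intro y hy hcy
    apply hmin y (hperm.mem_iff.mpr hy)
    rw [← hcnt, hcount y, hcount _]
    exact_mod_cast hcy

-- ===== VERDICT (by name: the statement is the Claim_ definition above) =====
theorem max_occurences_spec : Claim_equal_max_occurences := by
  intro lst _ hpre
  exact pvIsAns_unique (pvA_isAns lst hpre) (pvB_isAns lst hpre)
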